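-- pv_equiv track=rewrite | github.com/nmaraquya/qomanya | qomanya.py | server_servant
-- ===== SOURCE A (Python) =====
-- def server_servant(PACKlist, wdiscr):
-- 	#variables:
-- 	#PACKlist - main packets list that is saved on the server
-- 	#wdiscr - write descriptor - sequence of last written peace of file
-- 	#wseqs - list of packet sequences that have to be written
-- 	#gnACK - list that contains sequences of all missed packets and write descriptor
-- 	#wlist - list of packets that is ready to be written
-- 	#seqslist - list of sequences of packets from PACKlist
-- 	#nPACKlist - filtered PACKlist
-- 	wseqs,gnACK,wlist,missed,seqslist,nPACKlist=[],[],[],[],[],[]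
-- 	memory=0
-- 	for PACK in sorted(PACKlist): #filtering PACKLIST and make packet sequences lists in packlist
-- 		if memory==PACK[0]: continue
-- 		if PACK[0]>wdiscr:
-- 			nPACKlist.append(PACK)
-- 			seqslist.append(PACK[0])
-- 		memory=PACK[0]
-- 	if seqslist: missed=sorted(set(range(wdiscr+1, max(seqslist)+1)).difference(seqslist)) # search for lost packets
-- 	if seqslist:  # make a list of packet sequences that have to be written
-- 		if wdiscr+1==min(seqslist):
-- 			if missed:
-- 				for i in range(wdiscr+1,min(missed)): wseqs.append(i)
-- 			else:
-- 				wseqs=seqslist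
-- 	ndiscr=max(wseqs) if wseqs else wdiscr # make new write descriptor
-- 	if len(missed)<368: # make gnACK or gnACKs if number of lost packets is too huge
-- 		gnACK=[[ndiscr,*missed]]
-- 	else:
-- 		gm=[ndiscr]
-- 		for i in missed:
-- 			if len(gm)<368:
-- 				gm.append(i)
-- 			else:
-- 				gnACK.append(gm)
-- 				gm=[ndiscr]
-- 				gm.append(i)
-- 		gnACK.append(gm)
-- 	for term in wseqs: # make a list of packets that must be written and also filtering main list of recieved packets
-- 		for PACK in nPACKlist:
-- 			if term==PACK[0]:
-- 				wlist.append(PACK)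
-- 				nPACKlist.remove(PACK)
-- 				break
-- 	return nPACKlist,wlist,gnACK
-- ===== SOURCE B (Python) =====
-- def server_servant(PACKlist, wdiscr):
--     # Same filtering semantics as the original, then positional slicing instead of
--     # the nested search-and-remove loop, an ordered range scan instead of
--     # set-difference-then-sort, and slice-based chunking for gnACK.
--     prev = 0
--     nPACKlist = []
--     for PACK in sorted(PACKlist):
--         if PACK[0] != prev and PACK[0] > wdiscr:
--             nPACKlist.append(PACK)
--         prev = PACK[0]
--     seqs = {P[0] for P in nPACKlist}
--     missed = []
--     if nPACKlist:
--         missed = [i for i in range(wdiscr + 1, nPACKlist[-1][0] + 1) if i not in seqs]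
--     k = 0
--     for P in nPACKlist:
--         if P[0] != wdiscr + 1 + k:
--             break
--         k += 1
--     gnACK, rest = [], missed
--     while True:
--         gnACK.append([wdiscr + k] + rest[:367])
--         rest = rest[367:]
--         if not rest:
--             break
--     return nPACKlist[k:], nPACKlist[:k], gnACK
-- ===== Notes on version B (the rewrite author's own statement) =====
-- stated objective: simpler
-- what changed: B keeps A's filtering pass but replaces the nested search-and-remove extraction loop by a positional slice split at the length of the contiguous head prefix, the set-difference-then-sort computation of missed by a single ordered range scan, and the element-by-element gnACK accumulator by slice-based chunking.
import Mathlib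
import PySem

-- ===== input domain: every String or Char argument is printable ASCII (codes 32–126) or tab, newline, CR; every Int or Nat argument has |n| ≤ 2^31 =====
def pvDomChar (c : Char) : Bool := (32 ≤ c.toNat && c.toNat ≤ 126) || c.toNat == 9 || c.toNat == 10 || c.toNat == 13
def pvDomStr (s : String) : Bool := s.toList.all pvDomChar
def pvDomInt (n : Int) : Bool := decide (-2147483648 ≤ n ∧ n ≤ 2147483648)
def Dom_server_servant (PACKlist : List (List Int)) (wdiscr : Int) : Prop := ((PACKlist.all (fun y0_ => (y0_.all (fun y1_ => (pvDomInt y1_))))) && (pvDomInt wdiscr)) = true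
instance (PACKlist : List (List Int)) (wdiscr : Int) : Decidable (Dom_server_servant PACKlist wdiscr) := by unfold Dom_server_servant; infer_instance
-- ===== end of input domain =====

-- B replaces the nested search-and-remove extraction by slice splitting, the
-- set-difference-then-sort by an ordered range scan, and the element-by-element
-- gnACK accumulation by slice chunking; equivalence is proved for packet lists
-- whose packets are nonempty (on an empty packet Python A raises IndexError).

-- PACK[0] (with default; Pre_ guarantees packets are nonempty)
def pvHead (P : List Int) : Int := PySem.List.pyGetD P 0 0

-- sorted(PACKlist): Python's lexicographic comparison of int lists = Mathlib's Lex (· < ·)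
def pvSort (xs : List (List Int)) : List (List Int) :=
  @PySem.List.sorted (List Int) (List Int) List.instLinearOrder.toLT LinearOrder.toDecidableLT xs (fun x => x) false

-- ===== PORT A =====
-- stage 1: the filtering loop, state = (memory, nPACKlist, seqslist)
def pvStepA (wdiscr : Int) (st : Int × List (List Int) × List Int) (PACK : List Int) :
    Int × List (List Int) × List Int :=
  if st.1 == pvHead PACK then st
  else if pvHead PACK > wdiscr then (pvHead PACK, st.2.1 ++ [PACK], st.2.2 ++ [pvHead PACK])
  else (pvHead PACK, st.2.1, st.2.2)

def server_servant (PACKlist : List (List Int)) (wdiscr : Int) :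
    List (List Int) × List (List Int) × List (List Int) :=
  let st := (pvSort PACKlist).foldl (pvStepA wdiscr) (0, [], [])
  let nPACKlist := st.2.1
  let seqslist := st.2.2
  -- missed = sorted(set(range(wdiscr+1, max(seqslist)+1)).difference(seqslist))
  let missed :=
    if seqslist ≠ [] then
      match PySem.List.max? seqslist (fun x => x) with
      | some mx =>
          PySem.List.sorted
            (PySem.Set.diff (PySem.Set.ofList (PySem.List.pyRange (wdiscr + 1) (mx + 1) 1)) seqslist)
            (fun x => x) false
      | none => []
    else []
  -- wseqs
  let wseqs :=
    if seqslist ≠ [] then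
      match PySem.List.min? seqslist (fun x => x) with
      | some mn =>
          if wdiscr + 1 == mn then
            if missed ≠ [] then
              match PySem.List.min? missed (fun x => x) with
              | some mm => PySem.List.pyRange (wdiscr + 1) mm 1
              | none => []
            else seqslist
          else []
      | none => []
    else []
  -- ndiscr
  let ndiscr := match PySem.List.max? wseqs (fun x => x) with
    | some m => m
    | none => wdiscr
  -- gnACK
  let gnACK :=
    if missed.length < 368 then [[ndiscr] ++ missed]
    else
      let fin := missed.foldl
        (fun (st : List (List Int) × List Int) i =>
          if st.2.length < 368 then (st.1, st.2 ++ [i]) else (st.1 ++ [st.2], [ndiscr, i]))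
        ([], [ndiscr])
      fin.1 ++ [fin.2]
  -- final extraction loop: for term in wseqs: find first PACK with PACK[0]==term, move it
  let fin := wseqs.foldl
    (fun (st : List (List Int) × List (List Int)) term =>
      match st.1.find? (fun P => term == pvHead P) with
      | some P => ((PySem.List.remove? st.1 P).getD st.1, st.2 ++ [P])
      | none => st)
    (nPACKlist, [])
  (fin.1, fin.2, gnACK)

-- ===== PORT B =====
-- stage 1 of Source B: single-condition filtering loop, state = (prev, nPACKlist)
def pvStepB (wdiscr : Int) (st : Int × List (List Int)) (PACK : List Int) : Int × List (List Int) :=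
  (pvHead PACK, if pvHead PACK ≠ st.1 ∧ pvHead PACK > wdiscr then st.2 ++ [PACK] else st.2)

-- the k-counting loop (breaks at the first non-contiguous head)
def pvKcount : List (List Int) → Int → Nat
  | [], _ => 0
  | P :: rest, v => if pvHead P = v then pvKcount rest (v + 1) + 1 else 0

-- the while-True chunking loop over slices (fuel = rest.length bounds the number of
-- iterations; with the invariant rest.length <= fuel the fuel never runs out mid-loop)
def pvChunksF (nd : Int) : Nat → List Int → List (List Int)
  | 0, rest => [[nd] ++ PySem.List.slice rest none (some 367)]
  | f + 1, rest =>
      if PySem.List.slice rest (some 367) none = [] then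
        [[nd] ++ PySem.List.slice rest none (some 367)]
      else
        ([nd] ++ PySem.List.slice rest none (some 367)) ::
          pvChunksF nd f (PySem.List.slice rest (some 367) none)

def pvChunks (nd : Int) (rest : List Int) : List (List Int) := pvChunksF nd rest.length rest

def server_servant_alt (PACKlist : List (List Int)) (wdiscr : Int) :
    List (List Int) × List (List Int) × List (List Int) :=
  let nP := ((pvSort PACKlist).foldl (pvStepB wdiscr) (0, [])).2
  let seqs := PySem.Set.ofList (nP.map pvHead)
  let missed :=
    if nP ≠ [] then
      (PySem.List.pyRange (wdiscr + 1) (pvHead (PySem.List.pyGetD nP (-1) []) + 1) 1).filter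
        (fun i => ¬ PySem.Set.contains seqs i)
    else []
  let k := pvKcount nP (wdiscr + 1)
  let gnACK := pvChunks (wdiscr + (k : Int)) missed
  (PySem.List.slice nP (some (k : Int)) none, PySem.List.slice nP none (some (k : Int)), gnACK)

-- ===== PRECONDITION & SPEC =====
-- Pre_ excludes packet lists containing an empty packet: there PACK[0] raises IndexError in A.
def Pre_server_servant (PACKlist : List (List Int)) (wdiscr : Int) : Prop :=
  ∀ P ∈ PACKlist, P ≠ []
instance (PACKlist : List (List Int)) (wdiscr : Int) : Decidable (Pre_server_servant PACKlist wdiscr) := by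
  unfold Pre_server_servant; infer_instance

def pvWitness_server_servant : List (List Int) × Int := ([[1, 7], [3], [2, 5]], 0)

def Spec_server_servant (PACKlist : List (List Int)) (wdiscr : Int)
    (out : List (List Int) × List (List Int) × List (List Int)) : Prop :=
  out = server_servant_alt PACKlist wdiscr
instance (PACKlist : List (List Int)) (wdiscr : Int)
    (out : List (List Int) × List (List Int) × List (List Int)) :
    Decidable (Spec_server_servant PACKlist wdiscr out) := by
  unfold Spec_server_servant; infer_instance

-- ===== CLAIM (what is proved, stated in full; the proofs are below) =====
def Claim_equal_server_servant : Prop :=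
  ∀ (PACKlist : List (List Int)) (wdiscr : Int), Dom_server_servant PACKlist wdiscr →
    Pre_server_servant PACKlist wdiscr →
    Spec_server_servant PACKlist wdiscr (server_servant PACKlist wdiscr)

-- ===== LEMMAS AND PROOFS =====

-- head is monotone w.r.t. Python's lexicographic order, on nonempty lists
lemma pvHead_mono {a b : List Int} (ha : a ≠ []) (h : a ≤ b) : pvHead a ≤ pvHead b := by
  rcases lt_or_eq_of_le h with h | h
  · rcases a with _ | ⟨x, xs⟩
    · exact absurd rfl ha
    · have h' : List.Lex (· < ·) (x :: xs) b := h
      cases h' with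
      | cons h2 => simp [pvHead, PySem.List.pyGetD_zero_cons]
      | rel h2 => simp only [pvHead, PySem.List.pyGetD_zero_cons]; omega
  · rw [h]

-- elements of a strictly increasing list are monotone in the index
lemma pvPairLe (xs : List Int) (hp : xs.Pairwise (· < ·)) (i j : Nat)
    (hi : i < xs.length) (hj : j < xs.length) (hij : i ≤ j) : xs[i] ≤ xs[j] := by
  rcases Nat.lt_or_ge i j with h | h
  · exact le_of_lt ((List.pairwise_iff_getElem.mp hp) i j hi hj h)
  · have : i = j := by omega
    subst this; exact le_refl _

-- stage 1: A's three-component fold equals B's two-component fold (+ seqslist = heads)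
lemma pvStage1_eq (w : Int) (l : List (List Int)) (m : Int) (nP : List (List Int)) :
    l.foldl (pvStepA w) (m, nP, nP.map pvHead) =
      ((l.foldl (pvStepB w) (m, nP)).1, (l.foldl (pvStepB w) (m, nP)).2,
        (l.foldl (pvStepB w) (m, nP)).2.map pvHead) := by
  induction l generalizing m nP with
  | nil => simp
  | cons P t ih =>
    simp only [List.foldl_cons]
    have hstep : pvStepA w (m, nP, nP.map pvHead) P =
        ((pvStepB w (m, nP) P).1, (pvStepB w (m, nP) P).2, (pvStepB w (m, nP) P).2.map pvHead) := by
      simp only [pvStepA, pvStepB]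
      by_cases he : m = pvHead P
      · subst he
        simp
      · have : (m == pvHead P) = false := by simp [he]
        rw [this]
        by_cases hgt : pvHead P > w
        · simp [Ne.symm he, hgt]
        · simp [hgt]
    rw [hstep, ih]

-- stage 1 invariant: the filtered list has strictly increasing heads, all > wdiscr
lemma pvStage1_inv (w : Int) (l : List (List Int)) (m : Int) (acc : List (List Int))
    (hl : (l.map pvHead).Pairwise (· ≤ ·))
    (hma : ∀ q ∈ acc.map pvHead, q ≤ m)
    (hcond : acc = [] ∨ ∀ P ∈ l, m ≤ pvHead P)
    (hp : (acc.map pvHead).Pairwise (· < ·))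
    (hw : ∀ q ∈ acc.map pvHead, w < q) :
    ((l.foldl (pvStepB w) (m, acc)).2.map pvHead).Pairwise (· < ·) ∧
      (∀ q ∈ (l.foldl (pvStepB w) (m, acc)).2.map pvHead, w < q) := by
  induction l generalizing m acc with
  | nil => exact ⟨hp, hw⟩
  | cons P t ih =>
    simp only [List.map_cons, List.pairwise_cons] at hl
    obtain ⟨hPt, ht⟩ := hl
    simp only [List.foldl_cons, pvStepB]
    by_cases hc : pvHead P ≠ m ∧ pvHead P > w
    · simp only [if_pos hc]
      have hlt : ∀ q ∈ acc.map pvHead, q < pvHead P := by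
        intro q hq
        rcases hcond with rfl | hcond
        · simp at hq
        · have h1 := hma q hq
          have h2 := hcond P (by simp)
          omega
      apply ih
      · exact ht
      · intro q hq
        simp only [List.map_append, List.map_cons, List.map_nil, List.mem_append,
          List.mem_singleton] at hq
        rcases hq with hq | rfl
        · exact le_of_lt (hlt q hq)
        · exact le_refl _
      · right; intro Q hQ; exact hPt (pvHead Q) (List.mem_map_of_mem hQ)
      · rw [List.map_append]
        rw [List.pairwise_append]
        refine ⟨hp, by simp, ?_⟩
        intro a ha b hb
        simp at hb
        subst hb
        exact hlt a ha
      · intro q hq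
        simp only [List.map_append, List.map_cons, List.map_nil, List.mem_append,
          List.mem_singleton] at hq
        rcases hq with hq | rfl
        · exact hw q hq
        · exact hc.2
    · simp only [if_neg hc]
      apply ih
      · exact ht
      · intro q hq
        have h1 := hma q hq
        rcases hcond with rfl | hcond
        · simp at hq
        · have h2 := hcond P (by simp)
          omega
      · right; intro Q hQ; exact hPt (pvHead Q) (List.mem_map_of_mem hQ)
      · exact hp
      · exact hw

-- max of a strictly increasing nonempty list is its last element
lemma pvMaxLast (xs : List Int) (hne : xs ≠ []) (hp : xs.Pairwise (· < ·)) :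
    PySem.List.max? xs (fun x => x) = some (xs.getLast hne) := by
  obtain ⟨m, hm⟩ : ∃ m, PySem.List.max? xs (fun x => x) = some m := by
    rcases h : PySem.List.max? xs (fun x => x) with _ | m
    · exact absurd ((PySem.List.max?_eq_none_iff xs _).mp h) hne
    · exact ⟨m, rfl⟩
  have hmem := PySem.List.max?_mem hm
  have hmax := PySem.List.max?_isMax hm
  have hlen : 0 < xs.length := List.length_pos_iff.mpr hne
  have hlast : xs.getLast hne = xs[xs.length - 1] := List.getLast_eq_getElem hne
  have hle : ∀ y ∈ xs, y ≤ xs.getLast hne := by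
    intro y hy
    obtain ⟨i, hi, rfl⟩ := List.mem_iff_getElem.mp hy
    rw [hlast]
    exact pvPairLe xs hp i (xs.length - 1) hi (by omega) (by omega)
  have h1 := hmax _ (List.getLast_mem hne)
  have h2 := hle m hmem
  simp only at h1
  rw [hm]; congr 1; omega

-- min of a strictly increasing list is its head
lemma pvMinHead (q : Int) (t : List Int) (hp : (q :: t).Pairwise (· < ·)) :
    PySem.List.min? (q :: t) (fun x => x) = some q := by
  obtain ⟨m, hm⟩ : ∃ m, PySem.List.min? (q :: t) (fun x => x) = some m := by
    rcases h : PySem.List.min? (q :: t) (fun x => x) with _ | m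
    · simp [PySem.List.min?_eq_none_iff] at h
    · exact ⟨m, rfl⟩
  have hmem := PySem.List.min?_mem hm
  have hmin := PySem.List.min?_isMin hm
  have hq : ∀ y ∈ q :: t, q ≤ y := by
    intro y hy
    rcases List.mem_cons.mp hy with rfl | hy
    · exact le_refl _
    · exact le_of_lt ((List.pairwise_cons.mp hp).1 y hy)
  have h1 := hmin q (by simp)
  have h2 := hq m hmem
  simp only at h1
  rw [hm]; congr 1; omega

-- range with step 1 is strictly increasing
lemma pvRange_pairwise (a b : Int) : (PySem.List.pyRange a b 1).Pairwise (· < ·) := by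
  have h : ∀ n : Nat, ∀ a b : Int, (b - a).toNat = n → (PySem.List.pyRange a b 1).Pairwise (· < ·) := by
    intro n
    induction n with
    | zero =>
      intro a b hn
      rw [PySem.List.pyRange_one_eq_nil (by omega)]
      exact List.Pairwise.nil
    | succ k ih =>
      intro a b hn
      rw [PySem.List.pyRange_one_cons (by omega)]
      refine List.pairwise_cons.mpr ⟨?_, ih (a+1) b (by omega)⟩
      intro x hx
      have := (PySem.List.mem_pyRange_one).mp hx
      omega
  exact h _ a b rfl

-- A's set-difference-then-sort equals B's ordered range scan
lemma pvMissed_eq (a : Int) (b : Int) (seqs : List Int) :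
    PySem.List.sorted
        (PySem.Set.diff (PySem.Set.ofList (PySem.List.pyRange a b 1)) seqs) (fun x => x) false
      = (PySem.List.pyRange a b 1).filter
          (fun i => ¬ PySem.Set.contains (PySem.Set.ofList seqs) i) := by
  have hnd : (PySem.List.pyRange a b 1).Nodup :=
    (pvRange_pairwise a b).imp ne_of_lt
  rw [PySem.Set.ofList_eq_self_of_nodup _ hnd]
  have hpred : ∀ x ∈ PySem.List.pyRange a b 1,
      (!List.contains seqs x) = decide ¬ (PySem.Set.contains (PySem.Set.ofList seqs) x = true) := by
    intro x _
    by_cases h : x ∈ seqs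
    · simp [PySem.Set.contains, h, (PySem.Set.mem_ofList seqs x).mpr h]
    · have : x ∉ PySem.Set.ofList seqs := fun hc => h ((PySem.Set.mem_ofList seqs x).mp hc)
      simp [PySem.Set.contains, h, this]
  have hdiff : PySem.Set.diff (PySem.List.pyRange a b 1) seqs
      = (PySem.List.pyRange a b 1).filter (fun i => ¬ PySem.Set.contains (PySem.Set.ofList seqs) i) := by
    unfold PySem.Set.diff
    exact List.filter_congr hpred
  rw [hdiff]
  apply PySem.List.sorted_eq_self_of_pairwise
  exact ((pvRange_pairwise a b).filter _).imp le_of_lt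

-- pvKcount facts
lemma pvKcount_le (nP : List (List Int)) (v : Int) : pvKcount nP v ≤ nP.length := by
  induction nP generalizing v with
  | nil => simp [pvKcount]
  | cons P t ih =>
    simp only [pvKcount]
    split
    · simpa using Nat.succ_le_succ (ih (v+1))
    · simp

lemma pvKcount_get (nP : List (List Int)) (v : Int) (i : Nat) (h : i < pvKcount nP v) :
    (nP.map pvHead)[i]? = some (v + i) := by
  induction nP generalizing v i with
  | nil => simp [pvKcount] at h
  | cons P t ih =>
    simp only [pvKcount] at h
    split at h
    · rename_i he
      cases i with
      | zero => simpa using he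
      | succ j =>
        have := ih (v+1) j (by omega)
        simpa [add_assoc, add_comm, add_left_comm] using this
    · omega

lemma pvKcount_stop (nP : List (List Int)) (v : Int) (h : pvKcount nP v < nP.length) :
    (nP.map pvHead)[pvKcount nP v]? ≠ some (v + pvKcount nP v) := by
  induction nP generalizing v with
  | nil => simp at h
  | cons P t ih =>
    simp only [pvKcount] at h ⊢
    split
    · rename_i he
      rw [if_pos he] at h
      have := ih (v+1) (by simp at h; omega)
      intro hc
      apply this
      simp only [List.map_cons, List.getElem?_cons_succ] at hc
      rw [hc]
      congr 1
      push_cast; omega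
    · rename_i he
      simpa using he

lemma pvKcount_take (nP : List (List Int)) (v : Int) :
    (nP.map pvHead).take (pvKcount nP v) = PySem.List.pyRange v (v + pvKcount nP v) 1 := by
  induction nP generalizing v with
  | nil =>
    simp only [pvKcount, List.map_nil, List.take_nil]
    rw [PySem.List.pyRange_one_eq_nil (by push_cast; omega)]
  | cons P t ih =>
    simp only [pvKcount]
    by_cases he : pvHead P = v
    · rw [if_pos he]
      rw [PySem.List.pyRange_one_cons (by push_cast; omega)]
      simp only [List.map_cons, List.take_succ_cons]
      rw [he, ih (v+1)]
      have harith : v + ((pvKcount t (v+1) + 1 : Nat) : Int) = (v+1) + ((pvKcount t (v+1) : Nat) : Int) := by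
        push_cast; omega
      rw [harith]
    · rw [if_neg he]
      rw [PySem.List.pyRange_one_eq_nil (by push_cast; omega)]
      simp

-- the Int-367 slices are take/drop
lemma pvSliceFrom (rest : List Int) : PySem.List.slice rest (some (367:Int)) none = rest.drop 367 :=
  PySem.List.slice_from rest (by norm_num)

lemma pvSliceTo (rest : List Int) : PySem.List.slice rest none (some (367:Int)) = rest.take 367 :=
  PySem.List.slice_to rest (by norm_num)

-- the chunking loop is fuel-insensitive once the fuel covers the list
lemma pvChunksF_congr (nd : Int) (f g : Nat) (rest : List Int)
    (hf : rest.length ≤ f) (hg : rest.length ≤ g) :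
    pvChunksF nd f rest = pvChunksF nd g rest := by
  induction f generalizing g rest with
  | zero =>
    have : rest = [] := List.eq_nil_of_length_eq_zero (by omega)
    subst this
    cases g with
    | zero => rfl
    | succ g' => simp [pvChunksF, pvSliceFrom]
  | succ f' ih =>
    cases g with
    | zero =>
      have : rest = [] := List.eq_nil_of_length_eq_zero (by omega)
      subst this
      simp [pvChunksF, pvSliceFrom]
    | succ g' =>
      simp only [pvChunksF]
      split
      · rfl
      · rename_i hne
        rw [ih g' _ ?_ ?_]
        all_goals
          rw [pvSliceFrom] at hne ⊢
          have : rest ≠ [] := by intro e; simp [e] at hne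
          have : 0 < rest.length := List.length_pos_iff.mpr this
          simp only [List.length_drop]
          omega

lemma pvChunks_unfold (nd : Int) (rest : List Int) :
    pvChunks nd rest =
      if rest.length ≤ 367 then [[nd] ++ rest]
      else ([nd] ++ rest.take 367) :: pvChunks nd (rest.drop 367) := by
  by_cases h : rest.length ≤ 367
  · rw [if_pos h]
    unfold pvChunks
    cases rest with
    | nil => simp [pvChunksF, pvSliceTo]
    | cons x t =>
      simp only [List.length_cons, pvChunksF]
      rw [pvSliceFrom, pvSliceTo]
      rw [List.drop_eq_nil_of_le (by simp only [List.length_cons] at h ⊢; omega)]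
      rw [if_pos rfl]
      rw [List.take_of_length_le (by simp only [List.length_cons] at h ⊢; omega)]
  · rw [if_neg h]
    unfold pvChunks
    cases rest with
    | nil => simp at h
    | cons x t =>
      simp only [List.length_cons, pvChunksF]
      rw [pvSliceFrom, pvSliceTo]
      have hd : (x :: t).drop 367 ≠ [] := by
        intro e
        have := congrArg List.length e
        simp at this h
        omega
      rw [if_neg hd]
      congr 1
      apply pvChunksF_congr
      · simp only [List.length_cons] at h; simp only [List.length_drop, List.length_cons]; omega
      · simp

-- A's element-by-element gnACK accumulation equals B's slice chunking
lemma pvFoldChunk (nd : Int) (rest : List Int) (g : List (List Int)) (pre : List Int)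
    (hpre : pre.length ≤ 367) :
    (rest.foldl
        (fun (st : List (List Int) × List Int) i =>
          if st.2.length < 368 then (st.1, st.2 ++ [i]) else (st.1 ++ [st.2], [nd, i]))
        (g, [nd] ++ pre)).1 ++
      [(rest.foldl
        (fun (st : List (List Int) × List Int) i =>
          if st.2.length < 368 then (st.1, st.2 ++ [i]) else (st.1 ++ [st.2], [nd, i]))
        (g, [nd] ++ pre)).2] = g ++ pvChunks nd (pre ++ rest) := by
  induction rest generalizing g pre with
  | nil =>
    simp only [List.foldl_nil, List.append_nil]
    rw [pvChunks_unfold, if_pos hpre]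
  | cons i rest' ih =>
    simp only [List.foldl_cons]
    by_cases hl : pre.length < 367
    · rw [if_pos (by simp only [List.length_append, List.length_cons, List.length_nil]; omega)]
      have : ([nd] ++ pre) ++ [i] = [nd] ++ (pre ++ [i]) := by simp
      rw [this, ih g (pre ++ [i]) (by simp; omega)]
      simp
    · have h367 : pre.length = 367 := by omega
      rw [if_neg (by simp only [List.length_append, List.length_cons, List.length_nil]; omega)]
      have : ([nd, i] : List Int) = [nd] ++ [i] := rfl
      rw [this, ih (g ++ [[nd] ++ pre]) [i] (by simp)]
      rw [pvChunks_unfold (rest := pre ++ i :: rest')]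
      rw [if_neg (by simp; omega)]
      have ht : (pre ++ i :: rest').take 367 = pre := by
        rw [← h367, List.take_left]
      have hd : (pre ++ i :: rest').drop 367 = i :: rest' := by
        rw [← h367, List.drop_left]
      rw [ht, hd]
      simp

lemma pvGnACK_eq (nd : Int) (missed : List Int) :
    (if missed.length < 368 then [[nd] ++ missed]
     else
       (missed.foldl
          (fun (st : List (List Int) × List Int) i =>
            if st.2.length < 368 then (st.1, st.2 ++ [i]) else (st.1 ++ [st.2], [nd, i]))
          ([], [nd])).1 ++
        [(missed.foldl
          (fun (st : List (List Int) × List Int) i =>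
            if st.2.length < 368 then (st.1, st.2 ++ [i]) else (st.1 ++ [st.2], [nd, i]))
          ([], [nd])).2]) = pvChunks nd missed := by
  by_cases h : missed.length < 368
  · rw [if_pos h, pvChunks_unfold, if_pos (by omega)]
  · rw [if_neg h]
    have : ([nd] : List Int) = [nd] ++ [] := by simp
    rw [this, pvFoldChunk nd missed [] [] (by simp)]
    simp

-- A's search-and-remove extraction over the head prefix is a slice split
lemma pvExtract (nP : List (List Int)) (k : Nat) (wl : List (List Int)) :
    ((nP.map pvHead).take k).foldl
        (fun (st : List (List Int) × List (List Int)) term =>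
          match st.1.find? (fun P => term == pvHead P) with
          | some P => ((PySem.List.remove? st.1 P).getD st.1, st.2 ++ [P])
          | none => st)
        (nP, wl) = (nP.drop k, wl ++ nP.take k) := by
  induction nP generalizing k wl with
  | nil => simp
  | cons P t ih =>
    cases k with
    | zero => simp
    | succ k' =>
      simp only [List.map_cons, List.take_succ_cons, List.foldl_cons]
      have hfind : (P :: t).find? (fun Q => pvHead P == pvHead Q) = some P := by
        simp
      rw [hfind]
      have hrem : PySem.List.remove? (P :: t) P = some t := by
        simp [PySem.List.remove?, List.idxOf?_cons]
      simp only [hrem, Option.getD_some]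
      rw [ih k' (wl ++ [P])]
      simp

-- membership in the missed list
lemma pvMemM (w mx : Int) (seqs : List Int) (x : Int) :
    x ∈ (PySem.List.pyRange (w+1) (mx+1) 1).filter
        (fun i => ¬ PySem.Set.contains (PySem.Set.ofList seqs) i) ↔
      (w + 1 ≤ x ∧ x < mx + 1 ∧ x ∉ seqs) := by
  rw [List.mem_filter, PySem.List.mem_pyRange_one]
  constructor
  · rintro ⟨⟨h1, h2⟩, h3⟩
    refine ⟨h1, h2, fun hc => ?_⟩
    simp only [PySem.Set.contains, decide_eq_true_eq] at h3
    exact h3 (List.contains_iff_mem.mpr ((PySem.Set.mem_ofList seqs x).mpr hc))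
  · rintro ⟨h1, h2, h3⟩
    refine ⟨⟨h1, h2⟩, ?_⟩
    simp only [PySem.Set.contains, decide_eq_true_eq]
    intro hc
    exact h3 ((PySem.Set.mem_ofList seqs x).mp (List.contains_iff_mem.mp hc))

-- the contiguous-prefix analysis: first gap, emptiness of missed, max of the prefix
lemma pvPrefixFacts (w : Int) (seqs : List Int) (k : Nat)
    (hp : seqs.Pairwise (· < ·))
    (hlen : k ≤ seqs.length)
    (hget : ∀ i (hi : i < k), seqs[i]'(by omega) = w + 1 + i)
    (hstop : ∀ hk : k < seqs.length, seqs[k]'(by omega) ≠ w + 1 + k)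
    (hk0 : 0 < k)
    (hne : seqs ≠ []) :
    ((PySem.List.pyRange (w+1) ((seqs.getLast hne)+1) 1).filter
        (fun i => ¬ PySem.Set.contains (PySem.Set.ofList seqs) i) = [] → k = seqs.length) ∧
    ((PySem.List.pyRange (w+1) ((seqs.getLast hne)+1) 1).filter
        (fun i => ¬ PySem.Set.contains (PySem.Set.ofList seqs) i) ≠ [] →
        k < seqs.length ∧
        PySem.List.min? ((PySem.List.pyRange (w+1) ((seqs.getLast hne)+1) 1).filter
          (fun i => ¬ PySem.Set.contains (PySem.Set.ofList seqs) i)) (fun x => x)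
          = some (w + 1 + (k:Int))) ∧
    PySem.List.max? (seqs.take k) (fun x => x) = some (w + (k:Int)) := by
  have hlenpos : 0 < seqs.length := List.length_pos_iff.mpr hne
  have hlast : seqs.getLast hne = seqs[seqs.length - 1] := List.getLast_eq_getElem hne
  set mx := seqs.getLast hne with hmx
  set M := (PySem.List.pyRange (w+1) (mx+1) 1).filter
      (fun i => ¬ PySem.Set.contains (PySem.Set.ofList seqs) i) with hM
  -- the candidate first gap
  have hnotmem : (w + 1 + (k:Int)) ∉ seqs := by
    intro hc
    obtain ⟨j, hj, hjeq⟩ := List.mem_iff_getElem.mp hc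
    rcases Nat.lt_or_ge j k with hjk | hjk
    · have := hget j hjk
      omega
    · -- j ≥ k, so seqs[j] ≥ seqs[k] > w+1+k
      have hkl : k < seqs.length := by omega
      have h1 : seqs[k] ≤ seqs[j] := pvPairLe seqs hp k j hkl hj hjk
      have h2 : seqs[k] ≠ w + 1 + k := hstop hkl
      have h3 : w + (k:Int) < seqs[k] := by
        have hkk := hget (k-1) (by omega)
        have h4 : seqs[k-1] < seqs[k] :=
          (List.pairwise_iff_getElem.mp hp) (k-1) k (by omega) hkl (by omega)
        have : ((k-1 : Nat) : Int) = (k:Int) - 1 := by omega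
        rw [this] at hkk
        omega
      omega
  have hmem_seqs : ∀ j (hj : j < k), seqs[j]'(by omega) ∈ seqs := by
    intro j hj; exact List.getElem_mem _
  -- the max? bullet
  have htake_ne : seqs.take k ≠ [] := by
    apply List.ne_nil_of_length_pos
    rw [List.length_take]
    omega
  have htake_p : (seqs.take k).Pairwise (· < ·) := hp.take
  have hmax : PySem.List.max? (seqs.take k) (fun x => x) = some (w + (k:Int)) := by
    rw [pvMaxLast _ htake_ne htake_p]
    have hlt : (seqs.take k).length = k := by rw [List.length_take]; omega
    have hopt : (seqs.take k).getLast? = some (w + (k:Int)) := by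
      rw [List.getLast?_eq_getElem?, hlt, List.getElem?_take]
      rw [if_pos (by omega)]
      rw [List.getElem?_eq_getElem (by omega)]
      have := hget (k-1) (by omega)
      rw [this]
      congr 1
      omega
    rw [List.getLast?_eq_some_getLast htake_ne] at hopt
    rw [Option.some_inj] at hopt
    rw [hopt]
  refine ⟨?_, ?_, hmax⟩
  · -- M = [] → k = length
    intro hMnil
    by_contra hcon
    have hkl : k < seqs.length := by omega
    have : (w + 1 + (k:Int)) ∈ M := by
      rw [hM, pvMemM]
      refine ⟨by omega, ?_, hnotmem⟩
      -- w+1+k ≤ mx : seqs[k] ≤ seqs[len-1] and w+1+k ≤ seqs[k]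
      have h1 : seqs[k] ≤ seqs[seqs.length - 1] := pvPairLe seqs hp k _ hkl (by omega) (by omega)
      have h2 : seqs[k] ≠ w + 1 + k := hstop hkl
      have h3 : w + (k:Int) < seqs[k] := by
        have hkk := hget (k-1) (by omega)
        have h4 : seqs[k-1] < seqs[k] :=
          (List.pairwise_iff_getElem.mp hp) (k-1) k (by omega) hkl (by omega)
        have : ((k-1 : Nat) : Int) = (k:Int) - 1 := by omega
        rw [this] at hkk
        omega
      rw [hlast]
      omega
    rw [hMnil] at this
    simp at this
  · intro hMne
    have hkl : k < seqs.length := by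
      by_contra hcon
      have hkeq : k = seqs.length := by omega
      apply hMne
      rw [List.eq_nil_iff_forall_not_mem]
      intro x hx
      rw [hM, pvMemM] at hx
      obtain ⟨h1, h2, h3⟩ := hx
      apply h3
      -- x ∈ [w+1, mx] and all those values are in seqs since seqs is fully contiguous
      have hxlt : x - (w+1) < (seqs.length : Int) := by
        rw [hlast] at h2
        have := hget (seqs.length - 1) (by omega)
        have hc : ((seqs.length - 1 : Nat) : Int) = (seqs.length : Int) - 1 := by omega
        rw [hc] at this
        omega
      set j := (x - (w+1)).toNat with hj
      have hjlt : j < seqs.length := by omega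
      have : seqs[j] = w + 1 + j := hget j (by omega)
      have hxval : x = seqs[j] := by omega
      rw [hxval]
      exact List.getElem_mem _
    refine ⟨hkl, ?_⟩
    -- min? M = w+1+k
    have hmemM : (w + 1 + (k:Int)) ∈ M := by
      rw [hM, pvMemM]
      refine ⟨by omega, ?_, hnotmem⟩
      have h1 : seqs[k] ≤ seqs[seqs.length - 1] := pvPairLe seqs hp k _ hkl (by omega) (by omega)
      have h2 : seqs[k] ≠ w + 1 + k := hstop hkl
      have h3 : w + (k:Int) < seqs[k] := by
        have hkk := hget (k-1) (by omega)
        have h4 : seqs[k-1] < seqs[k] :=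
          (List.pairwise_iff_getElem.mp hp) (k-1) k (by omega) hkl (by omega)
        have : ((k-1 : Nat) : Int) = (k:Int) - 1 := by omega
        rw [this] at hkk
        omega
      rw [hlast]
      omega
    have hlb : ∀ y ∈ M, (w + 1 + (k:Int)) ≤ y := by
      intro y hy
      rw [hM, pvMemM] at hy
      obtain ⟨h1, h2, h3⟩ := hy
      by_contra hcon
      apply h3
      set j := (y - (w+1)).toNat with hj
      have hjk : j < k := by omega
      have := hget j hjk
      have hyval : y = seqs[j]'(by omega) := by omega
      rw [hyval]
      exact List.getElem_mem _
    obtain ⟨m, hm⟩ : ∃ m, PySem.List.min? M (fun x => x) = some m := by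
      rcases h : PySem.List.min? M (fun x => x) with _ | m
      · exact absurd ((PySem.List.min?_eq_none_iff M _).mp h) hMne
      · exact ⟨m, rfl⟩
    have hmem := PySem.List.min?_mem hm
    have hmin := PySem.List.min?_isMin hm
    have h1 := hmin _ hmemM
    have h2 := hlb m hmem
    simp only at h1
    rw [hm]; congr 1; omega

-- ===== VERDICT (by name: the statement is the Claim_ definition above) =====
-- stage-1 corollary with the literal initial state
lemma pvStage1_eq' (w : Int) (l : List (List Int)) :
    l.foldl (pvStepA w) (0, [], []) =
      ((l.foldl (pvStepB w) (0, [])).1, (l.foldl (pvStepB w) (0, [])).2,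
        (l.foldl (pvStepB w) (0, [])).2.map pvHead) := by
  simpa using pvStage1_eq w l 0 []


-- phase 2: with the stage-1 output in cons form, A's remaining pipeline equals B's
lemma pvPhase2 (w : Int) (P : List Int) (t : List (List Int)) (X : Int)
    (hp : ((P :: t).map pvHead).Pairwise (· < ·)) :
    (let st := (X, P :: t, List.map pvHead (P :: t));
     let nPACKlist := st.2.1;
     let seqslist := st.2.2;
     let missed :=
       if seqslist ≠ [] then
         match PySem.List.max? seqslist (fun x => x) with
         | some mx =>
             PySem.List.sorted
               (PySem.Set.diff (PySem.Set.ofList (PySem.List.pyRange (w + 1) (mx + 1) 1)) seqslist)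
               (fun x => x) false
         | none => []
       else []
     let wseqs :=
       if seqslist ≠ [] then
         match PySem.List.min? seqslist (fun x => x) with
         | some mn =>
             if w + 1 == mn then
               if missed ≠ [] then
                 match PySem.List.min? missed (fun x => x) with
                 | some mm => PySem.List.pyRange (w + 1) mm 1
                 | none => []
               else seqslist
             else []
         | none => []
       else []
     let ndiscr := match PySem.List.max? wseqs (fun x => x) with
       | some m => m
       | none => w
     let gnACK :=
       if missed.length < 368 then [[ndiscr] ++ missed]
       else
         let fin := missed.foldl
           (fun (st : List (List Int) × List Int) i =>
             if st.2.length < 368 then (st.1, st.2 ++ [i]) else (st.1 ++ [st.2], [ndiscr, i]))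
           ([], [ndiscr])
         fin.1 ++ [fin.2]
     let fin := wseqs.foldl
       (fun (st : List (List Int) × List (List Int)) term =>
         match st.1.find? (fun P => term == pvHead P) with
         | some P => ((PySem.List.remove? st.1 P).getD st.1, st.2 ++ [P])
         | none => st)
       (nPACKlist, [])
     (fin.1, fin.2, gnACK)) =
    (let nP := P :: t;
     let seqs := PySem.Set.ofList (nP.map pvHead);
     let missed :=
       if nP ≠ [] then
         (PySem.List.pyRange (w + 1) (pvHead (PySem.List.pyGetD nP (-1) []) + 1) 1).filter
           (fun i => ¬ PySem.Set.contains seqs i)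
       else []
     let k := pvKcount nP (w + 1);
     let gnACK := pvChunks (w + (k : Int)) missed
     (PySem.List.slice nP (some (k : Int)) none, PySem.List.slice nP none (some (k : Int)), gnACK)) := by
  have hne : (P :: t : List (List Int)) ≠ [] := List.cons_ne_nil P t
  have hsne : (P :: t).map pvHead ≠ [] := by simp
  simp only [ne_eq, reduceCtorEq, not_false_eq_true, if_pos, List.map_eq_nil_iff]
  have hmaxseqs : PySem.List.max? ((P :: t).map pvHead) (fun x => x)
      = some (((P :: t).map pvHead).getLast hsne) := pvMaxLast _ hsne hp
  have hBlast : pvHead (PySem.List.pyGetD (P :: t) (-1) ([] : List Int))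
      = ((P :: t).map pvHead).getLast hsne := by
    rw [PySem.List.pyGetD_neg_one (P :: t) [] hne]
    exact (List.getLast_map hsne).symm
  rw [hBlast]
  simp only [List.map_cons] at hmaxseqs hp ⊢
  rw [hmaxseqs]
  simp only [pvMissed_eq]
  have hminseqs : PySem.List.min? (pvHead P :: List.map pvHead t) (fun x => x) = some (pvHead P) :=
    pvMinHead _ _ hp
  rw [hminseqs]
  simp only []
  by_cases hh : pvHead P = w + 1
  · -- the heads start right after wdiscr: a (possibly full) prefix is writable
    have hbeq : (w + 1 == pvHead P) = true := by simp [hh]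
    rw [hbeq]
    simp only [if_true]
    have hk0 : 0 < pvKcount (P :: t) (w + 1) := by
      simp [pvKcount, hh]
    have hlen : pvKcount (P :: t) (w + 1) ≤ (pvHead P :: List.map pvHead t).length := by
      have := pvKcount_le (P :: t) (w + 1)
      simp at this ⊢
      omega
    have hget : ∀ i (hi : i < pvKcount (P :: t) (w + 1)),
        (pvHead P :: List.map pvHead t)[i]'(by simp at hlen ⊢; omega) = w + 1 + i := by
      intro i hi
      have h2 := pvKcount_get (P :: t) (w + 1) i hi
      simp only [List.map_cons] at h2
      rwa [List.getElem?_eq_getElem (by simp at hlen ⊢; omega), Option.some_inj] at h2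
    have hstop : ∀ hkl : pvKcount (P :: t) (w + 1) < (pvHead P :: List.map pvHead t).length,
        (pvHead P :: List.map pvHead t)[pvKcount (P :: t) (w + 1)]'(by omega)
          ≠ w + 1 + pvKcount (P :: t) (w + 1) := by
      intro hkl
      have h2 := pvKcount_stop (P :: t) (w + 1) (by simp at hkl ⊢; omega)
      simp only [List.map_cons] at h2
      rwa [List.getElem?_eq_getElem (by simp at hkl ⊢; omega), ne_eq, Option.some_inj] at h2
    obtain ⟨hS1, hS2, hSmax⟩ :=
      pvPrefixFacts w (pvHead P :: List.map pvHead t) (pvKcount (P :: t) (w + 1))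
        hp hlen hget hstop hk0 (List.cons_ne_nil _ _)
    by_cases hM : (PySem.List.pyRange (w + 1)
          ((pvHead P :: List.map pvHead t).getLast (List.cons_ne_nil _ _) + 1)).filter
            (fun i => ¬ PySem.Set.contains (PySem.Set.ofList (pvHead P :: List.map pvHead t)) i) = []
    · -- nothing is missing: the whole filtered list is writable
      have hktop : pvKcount (P :: t) (w + 1) = t.length + 1 := by
        have := hS1 hM
        simpa using this
      rw [if_neg (not_not_intro hM)]
      have htk : (pvHead P :: List.map pvHead t).take (pvKcount (P :: t) (w + 1))
          = pvHead P :: List.map pvHead t :=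
        List.take_of_length_le (by simp; omega)
      rw [htk] at hSmax
      rw [hSmax]
      simp only []
      have hex := pvExtract (P :: t) (pvKcount (P :: t) (w + 1)) []
      simp only [List.map_cons] at hex
      rw [htk] at hex
      rw [hex]
      rw [pvGnACK_eq]
      rw [PySem.List.slice_from_natCast, PySem.List.slice_to_natCast]
      simp
    · -- some packets are missing: the writable prefix stops at the first gap
      obtain ⟨hklt, hmin⟩ := hS2 hM
      rw [if_pos hM]
      rw [hmin]
      simp only []
      have ktake := pvKcount_take (P :: t) (w + 1)
      simp only [List.map_cons] at ktake
      rw [ktake] at hSmax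
      rw [hSmax]
      simp only []
      have hex := pvExtract (P :: t) (pvKcount (P :: t) (w + 1)) []
      simp only [List.map_cons] at hex
      rw [ktake] at hex
      rw [hex]
      rw [pvGnACK_eq]
      rw [PySem.List.slice_from_natCast, PySem.List.slice_to_natCast]
      simp
  · -- heads do not start at wdiscr+1: nothing is writable
    have hbeq : (w + 1 == pvHead P) = false := by
      simp only [beq_eq_false_iff_ne, ne_eq]
      omega
    rw [hbeq]
    have hk : pvKcount (P :: t) (w + 1) = 0 := by
      simp [pvKcount, hh]
    rw [hk]
    simp only [Bool.false_eq_true, if_false, List.foldl_nil, Nat.cast_zero, add_zero]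
    rw [PySem.List.slice_from (P :: t) (by norm_num), PySem.List.slice_to (P :: t) (by norm_num)]
    simp only [Int.toNat_zero, List.drop_zero, List.take_zero]
    rw [pvGnACK_eq]
    simp [PySem.List.max?]

theorem server_servant_spec : Claim_equal_server_servant := by
  intro PACKlist w _hdom hpre
  unfold Spec_server_servant server_servant server_servant_alt
  have hsortmem : ∀ P ∈ pvSort PACKlist, P ≠ [] := by
    intro P hP
    exact hpre P ((@PySem.List.mem_sorted (List Int) (List Int) List.instLinearOrder.toLT LinearOrder.toDecidableLT PACKlist (fun x => x) false P).mp hP)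
  have hsorted : (pvSort PACKlist).Pairwise (fun a b => a ≤ b) :=
    PySem.List.sorted_pairwise (κ := List Int) PACKlist (fun x => x)
  have hheads : ((pvSort PACKlist).map pvHead).Pairwise (· ≤ ·) := by
    rw [List.pairwise_map]
    refine List.Pairwise.imp_of_mem ?_ hsorted
    intro a b ha _ hab
    exact pvHead_mono (hsortmem a ha) hab
  rw [pvStage1_eq' w (pvSort PACKlist)]
  have hinv := pvStage1_inv w (pvSort PACKlist) 0 [] hheads (by simp) (Or.inl rfl)
    (by simp) (by simp)
  set nP := ((pvSort PACKlist).foldl (pvStepB w) (0, [])).2 with hnPdef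
  obtain ⟨hp, -⟩ := hinv
  clear hnPdef
  clear_value nP
  cases nP with
  | nil =>
    simp only [List.map_nil]
    norm_num
    constructor
    · rw [PySem.List.slice_to _ (by norm_num)]
      simp
    · simp only [pvChunks, pvChunksF, List.length_nil]
      rw [pvSliceTo]
      simp [PySem.List.max?]
  | cons P t =>
    exact pvPhase2 w P t _ hp
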